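-- pv_equiv track=rewrite | github.com/kelliott-cloud/Nexus-12 | backend/research_ingestion.py | _paragraph_chunk
-- ===== SOURCE A (Python) =====
-- def _paragraph_chunk(text, sections):
--     paragraphs = [p.strip() for p in text.split("\n\n") if p.strip() and len(p.strip()) > 20]
--     current_section = "Document"
--     section_titles = [s.get("title", "") for s in sections]
--     chunks = []
--     for para in paragraphs:
--         for st in section_titles:
--             if st and st.lower() in para.lower()[:len(st) + 20]:
--                 current_section = st
--                 break
--         chunks.append({"text": para, "section": current_section})
--     return chunks
-- ===== SOURCE B (Python) =====
-- def _paragraph_chunk(text, sections):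
--     paragraphs = [p.strip() for p in text.split("\n\n") if p.strip() and len(p.strip()) > 20]
--     titles = [s.get("title", "") for s in sections]
--
--     def label(p):
--         head = p.lower()
--         for st in titles:
--             if st and st.lower() in head[:len(st) + 20]:
--                 return st
--         return None
--
--     # Group paragraphs into section runs: each run starts at a labelled paragraph
--     # (or at the very beginning with the "Document" default) and extends over the
--     # following unlabelled paragraphs; the whole run is tagged at once.
--     pairs = [(p, label(p)) for p in paragraphs]
--     chunks = []
--     current = "Document"
--     i = 0
--     n = len(pairs)
--     while i < n:
--         p, lb = pairs[i]
--         if lb is not None: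
--             current = lb
--         j = i + 1
--         while j < n and pairs[j][1] is None:
--             j += 1
--         chunks.extend({"text": q, "section": current} for q, _ in pairs[i:j])
--         i = j
--     return chunks
-- ===== Notes on version B (the rewrite author's own statement) =====
-- stated objective: alternative
-- what changed: Replaces A's single per-paragraph loop carrying a mutable current_section by run-grouping: label each paragraph once, then split the paragraph list into section runs (a labelled head plus the following unlabelled paragraphs, found with an inner skip-ahead) and tag each whole run at once.
import Mathlib
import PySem

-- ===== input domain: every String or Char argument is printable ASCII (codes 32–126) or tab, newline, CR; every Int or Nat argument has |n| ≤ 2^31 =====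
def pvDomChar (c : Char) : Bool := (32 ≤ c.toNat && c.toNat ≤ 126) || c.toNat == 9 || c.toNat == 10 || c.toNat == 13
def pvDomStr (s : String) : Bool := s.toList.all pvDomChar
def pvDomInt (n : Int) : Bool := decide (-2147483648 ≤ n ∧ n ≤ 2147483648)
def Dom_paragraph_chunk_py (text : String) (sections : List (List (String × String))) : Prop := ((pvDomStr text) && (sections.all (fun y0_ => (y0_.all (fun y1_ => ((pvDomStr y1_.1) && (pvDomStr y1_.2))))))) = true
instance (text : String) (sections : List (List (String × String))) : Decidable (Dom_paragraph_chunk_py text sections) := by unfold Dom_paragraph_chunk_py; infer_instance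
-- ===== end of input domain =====

-- B replaces A's single stateful per-paragraph loop by run-grouping: it labels each
-- paragraph once, then splits the list into section runs (a labelled head plus the
-- following unlabelled paragraphs) and tags each run wholesale; objective: alternative.

-- ===== PORT A =====
-- A's title match test: st and st.lower() in para.lower()[:len(st)+20]
def aMatch (st para : String) : Bool :=
  st != "" && PySem.Str.isIn (PySem.Str.lower st)
    (PySem.Str.slice (PySem.Str.lower para) none (some (PySem.Str.len st + 20)))

-- A's inner 'for st in section_titles: … break': first matching title, else current
def aScan (titles : List String) (para current : String) : String :=
  match titles with
  | [] => current
  | st :: rest => if aMatch st para then st else aScan rest para current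

def paragraph_chunk_py (text : String) (sections : List (List (String × String))) :
    List (List (String × String)) :=
  let paragraphs := ((PySem.Str.split? text "\n\n").getD []).filterMap (fun p =>
    let q := PySem.Str.strip p
    if q != "" && PySem.Str.len q > 20 then some q else none)
  let section_titles := sections.map (fun s => (PySem.Dict.mk s).getD "title" "")
  (paragraphs.foldl (fun (acc : String × List (List (String × String))) para =>
      let cur := aScan section_titles para acc.1
      (cur, acc.2 ++ [[("text", para), ("section", cur)]]))
    ("Document", [])).2

-- ===== PORT B =====
-- B's title match test (same guard and prefix-window test as A's, as the task requires)
def bMatch (st para : String) : Bool :=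
  st != "" && PySem.Str.isIn (PySem.Str.lower st)
    (PySem.Str.slice (PySem.Str.lower para) none (some (PySem.Str.len st + 20)))

-- B's label(p): first matching title, or none
def bLabel (titles : List String) (para : String) : Option String :=
  titles.find? (fun st => bMatch st para)

-- B's while loop: peel off one run (labelled head + following unlabelled paragraphs),
-- tag it wholesale, recurse on the remainder
def bRun (current : String) (pairs : List (String × Option String)) :
    List (List (String × String)) :=
  match pairs with
  | [] => []
  | (p, lb) :: rest =>
    let cur := match lb with | some t => t | none => current
    let run := (p, lb) :: rest.takeWhile (fun x => x.2.isNone)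
    let rest' := rest.dropWhile (fun x => x.2.isNone)
    run.map (fun q => [("text", q.1), ("section", cur)]) ++ bRun cur rest'
termination_by pairs.length
decreasing_by
  simp only [List.length_cons]
  exact Nat.lt_succ_of_le (List.length_dropWhile_le _ _)

def paragraph_chunk_py_alt (text : String) (sections : List (List (String × String))) :
    List (List (String × String)) :=
  let paragraphs := ((PySem.Str.split? text "\n\n").getD []).filterMap (fun p =>
    let q := PySem.Str.strip p
    if q != "" && PySem.Str.len q > 20 then some q else none)
  let titles := sections.map (fun s => (PySem.Dict.mk s).getD "title" "")
  let pairs := paragraphs.map (fun p => (p, bLabel titles p))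
  bRun "Document" pairs

-- ===== PRECONDITION & SPEC =====
def Spec_paragraph_chunk_py (text : String) (sections : List (List (String × String))) (out : List (List (String × String))) : Prop := out = paragraph_chunk_py_alt text sections
instance (text : String) (sections : List (List (String × String))) (out : List (List (String × String))) : Decidable (Spec_paragraph_chunk_py text sections out) := by unfold Spec_paragraph_chunk_py; infer_instance

-- ===== CLAIM (what is proved, stated in full; the proofs are below) =====
def Claim_equal_paragraph_chunk_py : Prop := ∀ (text : String) (sections : List (List (String × String))), Dom_paragraph_chunk_py text sections → Spec_paragraph_chunk_py text sections (paragraph_chunk_py text sections)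

-- ===== LEMMAS AND PROOFS =====

-- proof-side forward-fill of the optional labels (intermediate between A and B)
def bFill (current : String) : List (Option String) → List String
  | [] => []
  | lab :: rest => let cur := lab.getD current; cur :: bFill cur rest

theorem aScan_eq_label (titles : List String) (para current : String) :
    aScan titles para current = (bLabel titles para).getD current := by
  induction titles with
  | nil => rfl
  | cons st rest ih =>
    by_cases h : aMatch st para
    · simp [aScan, bLabel, h, show bMatch st para = true from h]
    · simp [aScan, bLabel, h, show bMatch st para = false from by simpa using h]
      simpa [bLabel] using ih

-- A's foldl equals tagging the zip of the paragraphs with the forward-filled labels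
theorem foldl_eq_zip_fill (titles : List String) (paras : List String)
    (current : String) (acc : List (List (String × String))) :
    (paras.foldl (fun (a : String × List (List (String × String))) para =>
        let cur := aScan titles para a.1
        (cur, a.2 ++ [[("text", para), ("section", cur)]])) (current, acc)).2
      = acc ++ (paras.zip (bFill current (paras.map (bLabel titles)))).map
          (fun pr => [("text", pr.1), ("section", pr.2)]) := by
  induction paras generalizing current acc with
  | nil => simp
  | cons p rest ih =>
    simp only [List.foldl, List.map, bFill, List.zip, List.zipWith, List.map]
    rw [ih, aScan_eq_label]
    simp [List.zip, List.map_zipWith]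

-- forward-fill over a none-run is constant; splitting at the first labelled element
theorem bFill_split (cur : String) (l : List (String × Option String)) :
    bFill cur (l.map Prod.snd)
      = (l.takeWhile (fun x => x.2.isNone)).map (fun _ => cur)
        ++ bFill cur ((l.dropWhile (fun x => x.2.isNone)).map Prod.snd) := by
  induction l with
  | nil => rfl
  | cons hd tl ih =>
    cases hlb : hd.2 with
    | none => simp [bFill, hlb, ih]
    | some t => simp [hlb]

theorem map_tag_eq_zipWith (cur : String) (l : List (String × Option String)) :
    l.map (fun q => [("text", q.1), ("section", cur)])
      = List.zipWith (fun x y => [("text", x), ("section", y)]) (l.map Prod.fst)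
          (l.map (fun _ => cur)) := by
  induction l with
  | nil => rfl
  | cons h t ih => simp [ih]

-- B's run-grouping equals tagging the zip with the forward-filled labels
theorem bRun_eq_zip_fill (current : String) (pairs : List (String × Option String)) :
    bRun current pairs
      = ((pairs.map Prod.fst).zip (bFill current (pairs.map Prod.snd))).map
          (fun pr => [("text", pr.1), ("section", pr.2)]) := by
  induction hn : pairs.length using Nat.strong_induction_on generalizing current pairs with
  | _ n ih =>
    match pairs, hn with
    | [], _ => rw [bRun.eq_def]; simp
    | (p, lb) :: rest, hn =>
      have hlen : (rest.dropWhile (fun x => x.2.isNone)).length < n := by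
        subst hn
        exact Nat.lt_succ_of_le (List.length_dropWhile_le _ _)
      have htw : (rest.takeWhile (fun x => x.2.isNone)).map Prod.fst
            ++ (rest.dropWhile (fun x => x.2.isNone)).map Prod.fst
          = rest.map Prod.fst := by
        rw [← List.map_append, List.takeWhile_append_dropWhile]
      cases lb with
      | none =>
        have hrec := ih _ hlen current (rest.dropWhile (fun x => x.2.isNone)) rfl
        rw [bRun.eq_def]
        simp only [List.map_cons, bFill, List.zip_cons_cons, List.map, Option.getD]
        rw [bFill_split current rest, ← htw, List.zip_append (by simp),
          List.map_append, hrec]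
        simp only [List.zip, List.map_zipWith, map_tag_eq_zipWith, List.cons_append]
      | some t =>
        have hrec := ih _ hlen t (rest.dropWhile (fun x => x.2.isNone)) rfl
        rw [bRun.eq_def]
        simp only [List.map_cons, bFill, List.zip_cons_cons, List.map, Option.getD]
        rw [bFill_split t rest, ← htw, List.zip_append (by simp),
          List.map_append, hrec]
        simp only [List.zip, List.map_zipWith, map_tag_eq_zipWith, List.cons_append]

-- ===== VERDICT (by name: the statement is the Claim_ definition above) =====
theorem paragraph_chunk_py_spec : Claim_equal_paragraph_chunk_py := by
  intro text sections _
  unfold Spec_paragraph_chunk_py paragraph_chunk_py paragraph_chunk_py_alt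
  rw [foldl_eq_zip_fill, bRun_eq_zip_fill]
  simp [List.map_map, Function.comp_def]
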